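-- pv_equiv track=rewrite | github.com/shizhenneko/Video-Transformer | src/utils/note_refiner.py | _dedupe_appendix_lines
-- ===== SOURCE A (Python) =====
-- def _dedupe_appendix_lines(lines: list[str]) -> list[str]:
--     deduped: list[str] = []
--     seen: set[str] = set()
--     for line in lines:
--         if line.startswith("### ") or line.startswith("#### "):
--             deduped.append(line)
--             seen.clear()
--             continue
--         normalized = " ".join(line.strip().split())
--         if not normalized:
--             if deduped and deduped[-1] == "":
--                 continue
--             deduped.append("")
--             continue
--         if normalized in seen:
--             continue
--         seen.add(normalized)
--         deduped.append(normalized)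
--     return deduped
-- ===== SOURCE B (Python) =====
-- def _dedupe_appendix_lines(lines: list[str]) -> list[str]:
--     # Pass 1: number the header sections; instead of a per-section set that is
--     # cleared at each header, keep ONE dictionary mapping a normalized line to
--     # the id of the section it was last emitted in: a line is a duplicate iff
--     # its stamp equals the current section id.  Blanks are all kept for now.
--     mid: list[str] = []
--     sec = 0
--     last: dict[str, int] = {}
--     for line in lines:
--         if line.startswith("### ") or line.startswith("#### "):
--             mid.append(line)
--             sec += 1
--         else:
--             n = " ".join(line.strip().split())
--             if n == "":
--                 mid.append("")
--             elif last.get(n, -1) != sec: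
--                 last[n] = sec
--                 mid.append(n)
--     # Pass 2: collapse runs of consecutive blank lines to a single blank.
--     out: list[str] = []
--     prev_blank = False
--     for x in mid:
--         blank = (x == "")
--         if not (blank and prev_blank):
--             out.append(x)
--         prev_blank = blank
--     return out
-- ===== Notes on version B (the rewrite author's own statement) =====
-- stated objective: alternative
-- what changed: A's single loop with a per-section seen-set cleared at each header and inline blank suppression is replaced by a section-stamped dictionary (normalized line -> id of the section it was last emitted in, never cleared, duplicate iff stamp equals the current section id) followed by a separate pass that collapses runs of consecutive blanks.
import Mathlib
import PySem

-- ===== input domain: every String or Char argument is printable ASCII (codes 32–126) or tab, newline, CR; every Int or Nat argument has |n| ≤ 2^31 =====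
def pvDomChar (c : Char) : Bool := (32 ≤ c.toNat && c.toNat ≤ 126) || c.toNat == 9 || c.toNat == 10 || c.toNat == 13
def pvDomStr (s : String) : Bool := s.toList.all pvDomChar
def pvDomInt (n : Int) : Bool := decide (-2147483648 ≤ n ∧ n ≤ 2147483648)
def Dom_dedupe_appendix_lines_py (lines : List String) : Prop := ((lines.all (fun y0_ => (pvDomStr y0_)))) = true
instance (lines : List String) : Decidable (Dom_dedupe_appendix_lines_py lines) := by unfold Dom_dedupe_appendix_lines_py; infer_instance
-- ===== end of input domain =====

-- B replaces A's cleared per-section seen-set and inline blank suppression by a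
-- section-stamped dictionary (norm -> id of the section it was last emitted in,
-- never cleared) plus a separate blank-collapsing pass; objective: alternative.

-- ===== PORT A =====
-- normalized = " ".join(line.strip().split())
def pvNorm (line : String) : String :=
  PySem.Str.join " " (PySem.Str.split₀ (PySem.Str.strip line))

-- one iteration of A's loop over state (deduped, seen)
def pvStepA (st : List String × PySem.Set String) (line : String) :
    List String × PySem.Set String :=
  if PySem.Str.startswith line "### " || PySem.Str.startswith line "#### " then
    (st.1 ++ [line], PySem.Set.empty)
  else
    if pvNorm line = "" then
      if st.1 ≠ [] ∧ PySem.List.pyGet? st.1 (-1) = some "" then st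
      else (st.1 ++ [""], st.2)
    else if PySem.Set.contains st.2 (pvNorm line) then st
    else (st.1 ++ [pvNorm line], PySem.Set.add st.2 (pvNorm line))

def dedupe_appendix_lines_py (lines : List String) : List String :=
  (lines.foldl pvStepA ([], PySem.Set.empty)).1

-- ===== PORT B =====
-- pass 1: one iteration over state (mid, sec, last): a section counter and a
-- dictionary stamping each normalized line with the section it was emitted in
def pvStepB (st : List String × Int × PySem.Dict String Int) (line : String) :
    List String × Int × PySem.Dict String Int :=
  if PySem.Str.startswith line "### " || PySem.Str.startswith line "#### " then
    (st.1 ++ [line], st.2.1 + 1, st.2.2)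
  else
    let n := pvNorm line
    if n = "" then (st.1 ++ [""], st.2.1, st.2.2)
    else if PySem.Dict.getD st.2.2 n (-1) ≠ st.2.1 then
      (st.1 ++ [n], st.2.1, PySem.Dict.insert st.2.2 n st.2.1)
    else st

-- pass 2: collapse runs of consecutive blanks, tracking a prev_blank flag
def pvStep2 (st : List String × Bool) (x : String) : List String × Bool :=
  let blank := x == ""
  (if blank && st.2 then st.1 else st.1 ++ [x], blank)

def dedupe_appendix_lines_py_alt (lines : List String) : List String :=
  (((lines.foldl pvStepB ([], 0, PySem.Dict.empty)).1).foldl pvStep2 ([], false)).1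

-- ===== PRECONDITION & SPEC =====
def Spec_dedupe_appendix_lines_py (lines : List String) (out : List String) : Prop := out = dedupe_appendix_lines_py_alt lines
instance (lines : List String) (out : List String) : Decidable (Spec_dedupe_appendix_lines_py lines out) := by unfold Spec_dedupe_appendix_lines_py; infer_instance

-- ===== CLAIM (what is proved, stated in full; the proofs are below) =====
def Claim_equal_dedupe_appendix_lines_py : Prop := ∀ (lines : List String), Dom_dedupe_appendix_lines_py lines → Spec_dedupe_appendix_lines_py lines (dedupe_appendix_lines_py lines)

-- ===== LEMMAS AND PROOFS =====

-- the blank-collapsing pass starting from the initial state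
def pvCollapse (m : List String) : List String × Bool :=
  m.foldl pvStep2 ([], false)

theorem pvStep2_flag_inv (m : List String) (out : List String) (pb : Bool)
    (h : pb = true ↔ out.getLast? = some "") :
    (m.foldl pvStep2 (out, pb)).2 = true ↔
      (m.foldl pvStep2 (out, pb)).1.getLast? = some "" := by
  induction m generalizing out pb with
  | nil => simpa using h
  | cons x m ih =>
    simp only [List.foldl_cons]
    have hx : pvStep2 (out, pb) x =
        (if (x == "") && pb then out else out ++ [x], x == "") := rfl
    rw [hx]
    apply ih
    by_cases hb : ((x == "") && pb) = true
    · have hxe : x = "" := by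
        cases hxeq : (x == "") with
        | false => simp [hxeq] at hb
        | true => exact eq_of_beq hxeq
      have hpb : pb = true := by
        cases hpb : pb with
        | false => simp [hpb] at hb
        | true => rfl
      simp [hxe, hpb, h.mp hpb]
    · rw [if_neg hb]
      simp only [List.getLast?_append, List.getLast?_singleton, Option.some_or,
        Option.some.injEq]
      exact ⟨fun h1 => eq_of_beq h1, fun h1 => beq_iff_eq.mpr h1⟩

theorem pvCollapse_flag (m : List String) :
    (pvCollapse m).2 = true ↔ (pvCollapse m).1.getLast? = some "" := by
  unfold pvCollapse
  exact pvStep2_flag_inv m [] false (by simp)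

theorem pvCollapse_append (m : List String) (x : String) :
    pvCollapse (m ++ [x]) = pvStep2 (pvCollapse m) x := by
  unfold pvCollapse
  simp [List.foldl_append]

theorem pvHeader_ne_empty (line : String)
    (h : (PySem.Str.startswith line "### " || PySem.Str.startswith line "#### ") = true) :
    line ≠ "" := by
  intro he
  subst he
  simp [PySem.Str.startswith_eq] at h
  rcases h with h | h <;> simp [PySem.Chars.startswith_iff, List.prefix_nil] at h

-- main invariant: A's seen set contains exactly the norms stamped with the current section id
theorem pvMainB (lines : List String) :
    ∀ (m : List String) (s : PySem.Set String) (sec : Int) (d : PySem.Dict String Int),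
      (∀ x : String, x ≠ "" →
        (PySem.Set.contains s x = true ↔ PySem.Dict.getD d x (-1) = sec)) →
      (∀ x : String, PySem.Dict.getD d x (-1) ≤ sec) →
      (lines.foldl pvStepA ((pvCollapse m).1, s)).1 =
        (pvCollapse ((lines.foldl pvStepB (m, sec, d)).1)).1 := by
  induction lines with
  | nil => intro m s sec d _ _; rfl
  | cons line rest ih =>
    intro m s sec d hinv hbound
    simp only [List.foldl_cons]
    by_cases hh : (PySem.Str.startswith line "### " || PySem.Str.startswith line "#### ") = true
    · -- header line: appended verbatim; A clears the set, B bumps the section id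
      have hne : line ≠ "" := pvHeader_ne_empty line hh
      have hc : (pvCollapse (m ++ [line])).1 = (pvCollapse m).1 ++ [line] := by
        rw [pvCollapse_append]
        unfold pvStep2
        have : (line == "") = false := by simp [hne]
        simp [this]
      have hA : pvStepA ((pvCollapse m).1, s) line =
          ((pvCollapse (m ++ [line])).1, PySem.Set.empty) := by
        unfold pvStepA; rw [if_pos hh, hc]
      have hB : pvStepB (m, sec, d) line = (m ++ [line], sec + 1, d) := by
        unfold pvStepB; rw [if_pos hh]
      rw [hA, hB]
      apply ih (m ++ [line]) PySem.Set.empty (sec + 1) d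
      · intro x hx
        constructor
        · intro hcont; exact absurd hcont (by simp [PySem.Set.empty])
        · intro hd; exact absurd hd (by have := hbound x; omega)
      · intro x; have := hbound x; omega
    · by_cases hz : pvNorm line = ""
      · -- blank after normalization
        have hc : pvCollapse (m ++ [""]) =
            (if (pvCollapse m).2 then (pvCollapse m).1 else (pvCollapse m).1 ++ [""], true) := by
          rw [pvCollapse_append]
          unfold pvStep2
          simp
        have hcond : ((pvCollapse m).1 ≠ [] ∧ PySem.List.pyGet? (pvCollapse m).1 (-1) = some "")
            ↔ (pvCollapse m).2 = true := by
          rw [pvCollapse_flag, PySem.List.pyGet?_neg_one]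
          constructor
          · exact fun h => h.2
          · intro h
            refine ⟨?_, h⟩
            intro hnil
            rw [hnil] at h; simp at h
        have hA : pvStepA ((pvCollapse m).1, s) line =
            ((pvCollapse (m ++ [""])).1, s) := by
          unfold pvStepA; rw [if_neg hh, if_pos hz, hc]
          by_cases hflag : (pvCollapse m).2 = true
          · rw [if_pos (hcond.mpr hflag)]
            simp [hflag]
          · rw [if_neg (fun hcc => hflag (hcond.mp hcc))]
            simp only [Bool.not_eq_true] at hflag
            simp [hflag]
        have hB : pvStepB (m, sec, d) line = (m ++ [""], sec, d) := by
          unfold pvStepB; rw [if_neg hh]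
          simp only
          rw [if_pos hz]
        rw [hA, hB]
        exact ih (m ++ [""]) s sec d hinv hbound
      · by_cases hs : PySem.Set.contains s (pvNorm line) = true
        · -- duplicate within the section: both skip
          have hA : pvStepA ((pvCollapse m).1, s) line = ((pvCollapse m).1, s) := by
            unfold pvStepA; rw [if_neg hh, if_neg hz, if_pos hs]
          have hstamp : PySem.Dict.getD d (pvNorm line) (-1) = sec :=
            (hinv (pvNorm line) hz).mp hs
          have hB : pvStepB (m, sec, d) line = (m, sec, d) := by
            unfold pvStepB; rw [if_neg hh]
            simp only
            rw [if_neg hz, if_neg (by rw [not_not]; exact hstamp)]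
          rw [hA, hB]
          exact ih m s sec d hinv hbound
        · -- first occurrence: both emit; A adds to the set, B stamps the dict
          have hstamp : PySem.Dict.getD d (pvNorm line) (-1) ≠ sec := by
            intro hd
            exact hs ((hinv (pvNorm line) hz).mpr hd)
          have hc : (pvCollapse (m ++ [pvNorm line])).1 = (pvCollapse m).1 ++ [pvNorm line] := by
            rw [pvCollapse_append]
            unfold pvStep2
            have : (pvNorm line == "") = false := by simp [hz]
            simp [this]
          have hA : pvStepA ((pvCollapse m).1, s) line =
              ((pvCollapse (m ++ [pvNorm line])).1, PySem.Set.add s (pvNorm line)) := by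
            unfold pvStepA; rw [if_neg hh, if_neg hz, if_neg hs, hc]
          have hB : pvStepB (m, sec, d) line =
              (m ++ [pvNorm line], sec, PySem.Dict.insert d (pvNorm line) sec) := by
            unfold pvStepB; rw [if_neg hh]
            simp only
            rw [if_neg hz, if_pos hstamp]
          rw [hA, hB]
          apply ih (m ++ [pvNorm line]) (PySem.Set.add s (pvNorm line)) sec
            (PySem.Dict.insert d (pvNorm line) sec)
          · intro x hx
            rw [PySem.Dict.getD_insert]
            have hadd : PySem.Set.contains (PySem.Set.add s (pvNorm line)) x = true ↔
                x ∈ s ∨ x = pvNorm line := by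
              rw [PySem.Set.contains_iff, PySem.Set.mem_add]
            rw [hadd]
            have hsx : x ∈ s ↔ PySem.Set.contains s x = true := (PySem.Set.contains_iff s x).symm
            rw [hsx, hinv x hx]
            by_cases hxe : x = pvNorm line <;> simp [hxe]
          · intro x
            rw [PySem.Dict.getD_insert]
            by_cases hxe : x = pvNorm line
            · simp [hxe]
            · simp only [if_neg hxe]; exact hbound x

-- ===== VERDICT (by name: the statement is the Claim_ definition above) =====
theorem dedupe_appendix_lines_py_spec : Claim_equal_dedupe_appendix_lines_py := by
  intro lines _
  unfold Spec_dedupe_appendix_lines_py dedupe_appendix_lines_py dedupe_appendix_lines_py_alt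
  have h := pvMainB lines [] PySem.Set.empty 0 PySem.Dict.empty ?_ ?_
  · have h0 : (pvCollapse []).1 = ([] : List String) := rfl
    rw [h0] at h
    rw [h]
    rfl
  · intro x hx
    constructor
    · intro hcont; exact absurd hcont (by simp [PySem.Set.empty])
    · intro hd
      rw [PySem.Dict.getD_empty] at hd
      exact absurd hd (by omega)
  · intro x
    rw [PySem.Dict.getD_empty]
    omega
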